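-- pv_equiv track=rewrite | github.com/AntumDeluge/bin2header | src/bin2header.py | checkLongArg
-- ===== SOURCE A (Python) =====
-- def checkLongArg(a):
-- 	if a.startswith("--"):
-- 		d_count = 0
-- 		for ch in a:
-- 			if ch != "-":
-- 				break
--
-- 			d_count = d_count + 1
--
-- 		if d_count == 2:
-- 			return a.lstrip("-")
--
-- 	return None
-- ===== SOURCE B (Python) =====
-- def checkLongArg(a):
-- 	stripped = a.lstrip("-")
-- 	if len(a) - len(stripped) == 2:
-- 		return stripped
-- 	return None
-- ===== Notes on version B (the rewrite author's own statement) =====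
-- stated objective: simpler
-- what changed: Replaces the startswith check plus explicit per-character dash-counting loop with a closed-form computation: strip leading dashes once and compare the length difference to 2.
import Mathlib
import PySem

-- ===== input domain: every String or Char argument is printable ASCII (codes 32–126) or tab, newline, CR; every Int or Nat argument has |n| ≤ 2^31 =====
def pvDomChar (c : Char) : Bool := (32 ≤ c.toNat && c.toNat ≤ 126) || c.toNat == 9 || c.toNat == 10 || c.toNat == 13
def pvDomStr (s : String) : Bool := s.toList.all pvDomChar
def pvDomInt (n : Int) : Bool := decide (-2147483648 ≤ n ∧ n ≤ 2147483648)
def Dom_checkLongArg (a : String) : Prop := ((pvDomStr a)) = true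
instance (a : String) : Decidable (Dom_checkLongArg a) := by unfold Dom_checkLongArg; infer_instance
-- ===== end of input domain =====

-- B replaces the dash-counting loop with a closed-form length comparison after lstrip (objective: simpler).

-- ===== PORT A =====
-- the 'for ch in a: if ch != "-": break; d_count += 1' loop, as structural recursion
def pvDashCount (cs : List Char) (n : Int) : Int :=
  match cs with
  | [] => n
  | c :: rest => if c ≠ '-' then n else pvDashCount rest (n + 1)

def checkLongArg (a : String) : Option String :=
  if PySem.Str.startswith a "--" then
    let d_count := pvDashCount a.toList 0
    if d_count = 2 then
      -- a.lstrip("-"): drop leading '-' characters (exact: lstrip with a single strip char)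
      some (String.ofList (a.toList.dropWhile (fun c => c == '-')))
    else none
  else none

-- ===== PORT B =====
def checkLongArg_alt (a : String) : Option String :=
  -- stripped = a.lstrip("-") (exact: drop leading '-' characters)
  let stripped := a.toList.dropWhile (fun c => c == '-')
  if (a.toList.length : Int) - stripped.length = 2 then some (String.ofList stripped)
  else none

-- ===== PRECONDITION & SPEC =====
def Spec_checkLongArg (a : String) (out : Option String) : Prop := out = checkLongArg_alt a
instance (a : String) (out : Option String) : Decidable (Spec_checkLongArg a out) := by unfold Spec_checkLongArg; infer_instance

-- ===== CLAIM (what is proved, stated in full; the proofs are below) =====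
def Claim_equal_checkLongArg : Prop := ∀ (a : String), Dom_checkLongArg a → Spec_checkLongArg a (checkLongArg a)

-- ===== LEMMAS AND PROOFS =====
theorem pvDashCount_eq (cs : List Char) (n : Int) :
    pvDashCount cs n = (cs.takeWhile (fun c => c == '-')).length + n := by
  induction cs generalizing n with
  | nil => simp [pvDashCount]
  | cons c rest ih =>
    by_cases h : c = '-'
    · subst h
      simp [pvDashCount, ih]
      omega
    · simp [pvDashCount, h]

theorem takeWhile_two_prefix (cs : List Char)
    (h : (cs.takeWhile (fun c => c == '-')).length = 2) :
    ['-', '-'] <+: cs := by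
  have hall : ∀ c ∈ cs.takeWhile (fun c => c == '-'), c = '-' := by
    intro c hc
    have := List.mem_takeWhile_imp hc
    simpa using this
  have heq : cs.takeWhile (fun c => c == '-') = ['-', '-'] := by
    match hcs : cs.takeWhile (fun c => c == '-'), h with
    | [x, y], _ =>
      have hx : x = '-' := hall x (by rw [hcs]; simp)
      have hy : y = '-' := hall y (by rw [hcs]; simp)
      rw [hx, hy]
  calc ['-', '-'] = cs.takeWhile (fun c => c == '-') := heq.symm
    _ <+: cs := List.takeWhile_prefix _

theorem len_split (cs : List Char) :
    (cs.takeWhile (fun c => c == '-')).length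
      + (cs.dropWhile (fun c => c == '-')).length = cs.length := by
  rw [← List.length_append, List.takeWhile_append_dropWhile]

-- ===== VERDICT (by name: the statement is the Claim_ definition above) =====
theorem checkLongArg_spec : Claim_equal_checkLongArg := by
  intro a _
  unfold Spec_checkLongArg checkLongArg checkLongArg_alt
  have hsplit := len_split a.toList
  have hlen : (a.length : Int) = a.toList.length := by simp
  set k := (a.toList.takeWhile (fun c => c == '-')).length with hk
  have hdc : pvDashCount a.toList 0 = (k : Int) := by
    simpa using pvDashCount_eq a.toList 0
  have hB : ((a.length : Int)
      - (a.toList.dropWhile (fun c => c == '-')).length = 2) ↔ k = 2 := by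
    rw [hlen]; omega
  by_cases h2 : k = 2
  · have hpre : PySem.Chars.startswith a.toList ['-', '-'] = true :=
      (PySem.Chars.startswith_iff _ _).mpr
        (takeWhile_two_prefix a.toList (by simpa using h2))
    simp [hpre, hdc, h2, hB.mpr h2]
  · have hA : ¬ pvDashCount a.toList 0 = 2 := by
      rw [hdc]; exact_mod_cast fun h => h2 (by exact_mod_cast h)
    have hBne : ¬ ((a.length : Int)
        - (a.toList.dropWhile (fun c => c == '-')).length = 2) :=
      fun h => h2 (hB.mp h)
    by_cases hpre : PySem.Chars.startswith a.toList ['-', '-'] = true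
    · simp [hpre, hA, hBne]
    · simp [hpre, hBne]
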